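-- pv_equiv track=rewrite | github.com/highcansavci/multi-agent-chess-game | model/chess_components/rook.py | get_attack_path
-- ===== SOURCE A (Python) =====
-- def get_attack_path(from_pos, to_pos):
--     """
--     Get attack path for a Rook (horizontal or vertical only).
--     """
--     path = []
--     row_diff = to_pos[0] - from_pos[0]
--     col_diff = to_pos[1] - from_pos[1]
--
--     if row_diff != 0 and col_diff != 0:  # Rook can't move diagonally
--         return path
--
--     step_row = 0 if row_diff == 0 else row_diff // abs(row_diff)
--     step_col = 0 if col_diff == 0 else col_diff // abs(col_diff)
--
--     current_row, current_col = from_pos[0] + step_row, from_pos[1] + step_col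
--     while (current_row, current_col) != to_pos:
--         path.append((current_row, current_col))
--         current_row += step_row
--         current_col += step_col
--
--     return path
-- ===== SOURCE B (Python) =====
-- def get_attack_path(from_pos, to_pos):
--     (r1, c1), (r2, c2) = from_pos, to_pos
--     if r1 != r2 and c1 != c2:
--         return []  # rook can't move diagonally
--     if r1 == r2:
--         # horizontal (or no) move: enumerate strictly-between columns ascending,
--         # then reverse for a leftward move
--         cols = list(range(min(c1, c2) + 1, max(c1, c2)))
--         if c2 < c1:
--             cols.reverse()
--         return [(r1, c) for c in cols]
--     # vertical move
--     rows = list(range(min(r1, r2) + 1, max(r1, r2)))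
--     if r2 < r1:
--         rows.reverse()
--     return [(r, c1) for r in rows]
-- ===== Notes on version B (the rewrite author's own statement) =====
-- stated objective: alternative
-- what changed: B drops the step-vector/sentinel walk entirely: it enumerates the strictly-between coordinates of the segment as an ascending range between min and max of the endpoints, and reverses that list when the move goes toward smaller coordinates, mapping the fixed coordinate back in.
import Mathlib
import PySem

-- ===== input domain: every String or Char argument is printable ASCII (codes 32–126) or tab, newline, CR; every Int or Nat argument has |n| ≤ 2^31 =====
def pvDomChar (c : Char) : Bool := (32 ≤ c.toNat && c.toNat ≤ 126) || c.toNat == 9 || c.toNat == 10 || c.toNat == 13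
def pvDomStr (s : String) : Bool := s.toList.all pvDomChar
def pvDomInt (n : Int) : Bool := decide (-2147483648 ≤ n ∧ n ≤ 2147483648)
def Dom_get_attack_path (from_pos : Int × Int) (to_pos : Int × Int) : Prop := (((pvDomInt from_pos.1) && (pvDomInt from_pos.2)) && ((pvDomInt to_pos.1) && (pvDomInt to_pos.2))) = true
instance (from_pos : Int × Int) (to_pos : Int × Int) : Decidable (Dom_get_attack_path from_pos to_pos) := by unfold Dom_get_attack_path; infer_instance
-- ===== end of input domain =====

-- B drops A's step-vector/sentinel walk: it enumerates the strictly-between coordinates as an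
-- ascending range between min and max of the endpoints, reversing for a decreasing move (objective: alternative).

-- ===== PORT A =====
-- A's while-loop: sentinel test 'current != to_pos' each iteration.  The fuel argument
-- (row/col distance, enough for the loop to reach its sentinel) only makes the
-- recursion structurally total; the loop body and exit test are A's.
def gapLoop : Nat → Int × Int → Int × Int → Int → Int → List (Int × Int)
  | 0, _, _, _, _ => []
  | n+1, cur, to_pos, sr, sc =>
    if cur = to_pos then []
    else cur :: gapLoop n (cur.1 + sr, cur.2 + sc) to_pos sr sc

def get_attack_path (from_pos : Int × Int) (to_pos : Int × Int) : List (Int × Int) :=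
  let row_diff := to_pos.1 - from_pos.1
  let col_diff := to_pos.2 - from_pos.2
  if row_diff ≠ 0 ∧ col_diff ≠ 0 then []
  else
    let step_row := if row_diff = 0 then 0 else PySem.Int.floordiv row_diff |row_diff|
    let step_col := if col_diff = 0 then 0 else PySem.Int.floordiv col_diff |col_diff|
    gapLoop (row_diff.natAbs + col_diff.natAbs)
      (from_pos.1 + step_row, from_pos.2 + step_col) to_pos step_row step_col

-- ===== PORT B =====
def get_attack_path_alt (from_pos : Int × Int) (to_pos : Int × Int) : List (Int × Int) :=
  let r1 := from_pos.1
  let c1 := from_pos.2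
  let r2 := to_pos.1
  let c2 := to_pos.2
  if r1 ≠ r2 ∧ c1 ≠ c2 then []
  else if r1 = r2 then
    let cols := PySem.List.pyRange (min c1 c2 + 1) (max c1 c2) 1
    let cols := if c2 < c1 then cols.reverse else cols
    cols.map (fun c => (r1, c))
  else
    let rows := PySem.List.pyRange (min r1 r2 + 1) (max r1 r2) 1
    let rows := if r2 < r1 then rows.reverse else rows
    rows.map (fun r => (r, c1))

-- ===== PRECONDITION & SPEC =====
def Spec_get_attack_path (from_pos : Int × Int) (to_pos : Int × Int) (out : List (Int × Int)) : Prop := out = get_attack_path_alt from_pos to_pos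
instance (from_pos : Int × Int) (to_pos : Int × Int) (out : List (Int × Int)) : Decidable (Spec_get_attack_path from_pos to_pos out) := by unfold Spec_get_attack_path; infer_instance

-- ===== CLAIM =====
def Claim_equal_get_attack_path : Prop := ∀ (from_pos : Int × Int) (to_pos : Int × Int), Dom_get_attack_path from_pos to_pos → Spec_get_attack_path from_pos to_pos (get_attack_path from_pos to_pos)

-- ===== LEMMAS AND PROOFS =====

lemma floordiv_abs (a : Int) (h : a ≠ 0) : PySem.Int.floordiv a |a| = a.sign := by
  rcases lt_or_gt_of_ne h with hlt | hgt
  · have habs : |a| = -a := abs_of_neg hlt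
    rw [habs, PySem.Int.floordiv_eq_ediv_of_pos (by omega), Int.ediv_neg, Int.ediv_self h]
    simp [Int.sign_eq_neg_one_of_neg hlt]
  · have habs : |a| = a := abs_of_pos hgt
    rw [habs, PySem.Int.floordiv_eq_ediv_of_pos hgt, Int.ediv_self h]
    simp [Int.sign_eq_one_of_pos hgt]

lemma gapLoop_eq : ∀ (n k : Nat), k ≤ n → ∀ (c : Int × Int) (sr sc : Int), ¬(sr = 0 ∧ sc = 0) →
    gapLoop n c (c.1 + (k : Int) * sr, c.2 + (k : Int) * sc) sr sc
      = (List.range k).map (fun (i : Nat) => (c.1 + (i : Int) * sr, c.2 + (i : Int) * sc)) := by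
  intro n
  induction n with
  | zero =>
    intro k hk c sr sc hs
    interval_cases k
    simp [gapLoop]
  | succ n ih =>
    intro k hk c sr sc hs
    cases k with
    | zero => simp [gapLoop]
    | succ j =>
      have hne : c ≠ (c.1 + ((j + 1 : Nat) : Int) * sr, c.2 + ((j + 1 : Nat) : Int) * sc) := by
        intro h
        rw [Prod.ext_iff] at h
        obtain ⟨h1, h2⟩ := h
        simp only at h1 h2
        push_cast at h1 h2
        have e1 : ((j : Int) + 1) * sr = 0 := by linarith
        have e2 : ((j : Int) + 1) * sc = 0 := by linarith
        have hj : ((j : Int) + 1) ≠ 0 := by positivity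
        exact hs ⟨(mul_eq_zero.mp e1).resolve_left hj, (mul_eq_zero.mp e2).resolve_left hj⟩
      rw [gapLoop, if_neg hne]
      have hto : (c.1 + ((j + 1 : Nat) : Int) * sr, c.2 + ((j + 1 : Nat) : Int) * sc)
          = ((c.1 + sr) + (j : Int) * sr, (c.2 + sc) + (j : Int) * sc) := by
        rw [Prod.ext_iff]; push_cast; constructor <;> ring
      rw [hto, ih j (by omega) (c.1 + sr, c.2 + sc) sr sc hs]
      rw [List.range_succ_eq_map]
      simp only [List.map_cons, List.map_map]
      congr 1
      · simp
      · apply List.map_congr_left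
        intro i _
        simp only [Function.comp]
        rw [Prod.ext_iff]; push_cast; constructor <;> ring

lemma key (fp tp : Int × Int) (sr sc : Int) (hs : ¬(sr = 0 ∧ sc = 0)) (d : Nat) (hd : 1 ≤ d)
    (h1 : tp.1 = fp.1 + (d : Int) * sr) (h2 : tp.2 = fp.2 + (d : Int) * sc) :
    gapLoop d (fp.1 + sr, fp.2 + sc) tp sr sc
      = (List.range (d - 1)).map (fun (i : Nat) => (fp.1 + ((i : Int) + 1) * sr, fp.2 + ((i : Int) + 1) * sc)) := by
  have hcast : ((d - 1 : Nat) : Int) = (d : Int) - 1 := by omega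
  have htp : tp = ((fp.1 + sr) + ((d - 1 : Nat) : Int) * sr, (fp.2 + sc) + ((d - 1 : Nat) : Int) * sc) := by
    rw [Prod.ext_iff, h1, h2, hcast]
    constructor <;> ring
  rw [htp, gapLoop_eq d (d - 1) (by omega) (fp.1 + sr, fp.2 + sc) sr sc hs]
  apply List.map_congr_left
  intro i _
  rw [Prod.ext_iff]
  constructor <;> (push_cast; ring)

-- the reverse of an ascending mapped range, element-wise
lemma reverse_range_map {α : Type} (n : Nat) (f : Nat → α) :
    ((List.range n).map f).reverse = (List.range n).map (fun i => f (n - 1 - i)) := by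
  apply List.ext_getElem
  · simp
  · intro i h1 h2
    simp only [List.length_reverse, List.length_map, List.length_range] at h1 h2
    simp only [List.getElem_reverse, List.getElem_map, List.getElem_range,
      List.length_map, List.length_range]

-- B's range (after optional reversal) written as a map over List.range
lemma pyRange_minmax (a b : Int) (h : a ≠ b) :
    (if b < a then (PySem.List.pyRange (min a b + 1) (max a b) 1).reverse
     else PySem.List.pyRange (min a b + 1) (max a b) 1)
      = (List.range ((b - a).natAbs - 1)).map (fun (i : Nat) => a + ((i : Int) + 1) * (b - a).sign) := by
  rcases lt_or_gt_of_ne h with hab | hab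
  · -- a < b : ascending move, list kept as is
    rw [if_neg (by omega), PySem.List.pyRange_one]
    have hmin : min a b = a := min_eq_left hab.le
    have hmax : max a b = b := max_eq_right hab.le
    have hlen : (max a b - (min a b + 1)).toNat = (b - a).natAbs - 1 := by
      rw [hmin, hmax]; omega
    rw [hlen]
    apply List.map_congr_left
    intro i _
    have hsgn : (b - a).sign = 1 := Int.sign_eq_one_of_pos (by omega)
    rw [hmin, hsgn]
    ring
  · -- b < a : descending move, reversed list
    rw [if_pos (by omega), PySem.List.pyRange_one, reverse_range_map]
    have hmin : min a b = b := min_eq_right (by omega)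
    have hmax : max a b = a := max_eq_left (by omega)
    have hlen : (max a b - (min a b + 1)).toNat = (b - a).natAbs - 1 := by
      rw [hmin, hmax]; omega
    rw [hlen]
    apply List.map_congr_left
    intro i hi
    simp only [List.mem_range] at hi
    have hsgn : (b - a).sign = -1 := Int.sign_eq_neg_one_of_neg (by omega)
    rw [hmin, hsgn]
    omega

theorem get_attack_path_spec : Claim_equal_get_attack_path := by
  unfold Claim_equal_get_attack_path
  intro fp tp _
  unfold Spec_get_attack_path get_attack_path get_attack_path_alt
  by_cases hr : tp.1 - fp.1 = 0 <;> by_cases hc : tp.2 - fp.2 = 0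
  · -- same square: empty on both sides
    have h1 : fp.1 = tp.1 := by omega
    have h2 : fp.2 = tp.2 := by omega
    simp [gapLoop, h1, h2]
  · -- horizontal (same-row) move
    have hsgn := floordiv_abs (tp.2 - fp.2) hc
    have hs : ¬((0 : Int) = 0 ∧ (tp.2 - fp.2).sign = 0) := by
      simp [Int.sign_eq_zero_iff_zero, hc]
    rw [if_neg (show ¬(¬fp.1 = tp.1 ∧ ¬fp.2 = tp.2) by omega),
      if_pos (show fp.1 = tp.1 by omega)]
    simp only [hr, hc, ite_true, ite_false, ne_eq, not_true_eq_false, false_and,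
      Int.natAbs_zero, Nat.zero_add, hsgn]
    rw [key fp tp 0 ((tp.2 - fp.2).sign) hs ((tp.2 - fp.2).natAbs) (by omega)
        (by omega)
        (by rw [mul_comm]; have := Int.sign_mul_natAbs (tp.2 - fp.2); omega),
      pyRange_minmax fp.2 tp.2 (by omega), List.map_map]
    apply List.map_congr_left
    intro i _
    simp only [Function.comp]
    rw [Prod.ext_iff]
    constructor
    · simp
    · simp
  · -- vertical (same-column) move
    have hsgn := floordiv_abs (tp.1 - fp.1) hr
    have hs : ¬((tp.1 - fp.1).sign = 0 ∧ (0 : Int) = 0) := by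
      simp [Int.sign_eq_zero_iff_zero, hr]
    rw [if_neg (show ¬(¬fp.1 = tp.1 ∧ ¬fp.2 = tp.2) by omega),
      if_neg (show ¬fp.1 = tp.1 by omega)]
    simp only [hr, hc, ite_true, ite_false, ne_eq, not_true_eq_false, and_false,
      Int.natAbs_zero, Nat.add_zero, hsgn]
    rw [key fp tp ((tp.1 - fp.1).sign) 0 hs ((tp.1 - fp.1).natAbs) (by omega)
        (by rw [mul_comm]; have := Int.sign_mul_natAbs (tp.1 - fp.1); omega)
        (by omega),
      pyRange_minmax fp.1 tp.1 (by omega), List.map_map]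
    apply List.map_congr_left
    intro i _
    simp only [Function.comp]
    rw [Prod.ext_iff]
    constructor
    · simp
    · simp
  · -- diagonal: guard fires in both
    simp [hr, hc, show ¬fp.1 = tp.1 by omega, show ¬fp.2 = tp.2 by omega]
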